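-- pv_equiv track=rewrite | github.com/mag1c1an1/coding | py/od/a/guess_number.py | count_different_positions
-- ===== SOURCE A (Python) =====
-- def count_different_positions(num1, num2):
--
--     # 将数字转为字符串
--     str1 = str(num1)
--     str2 = str(num2)
--
--     # 初始化计数器
--     count = 0
--
--     # 创建数字频率字典
--     freq1 = {}
--     freq2 = {}
--
--     # 记录每个数字的出现频率
--     for digit in str1:
--         if digit in freq1:
--             freq1[digit] += 1
--         else:
--             freq1[digit] = 1
--
--     for digit in str2:
--         if digit in freq2:
--             freq2[digit] += 1
--         else:
--             freq2[digit] = 1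
--
--     # 计算相同数字但位置不同的数量
--     for digit in freq1:
--         if digit in freq2:
--             count += min(freq1[digit], freq2[digit])
--
--     # 计算相同数字在同一位置的数量
--     same_position = sum(1 for i in range(4) if str1[i] == str2[i])
--
--     # 返回相同数字但位置不同的数量
--     return count - same_position
-- ===== SOURCE B (Python) =====
-- def count_different_positions(num1, num2):
--     str1 = str(num1)
--     str2 = str(num2)
--     # multiset intersection size via sorted merge (no frequency dicts)
--     s1 = sorted(str1)
--     s2 = sorted(str2)
--     i = j = count = 0
--     while i < len(s1) and j < len(s2):
--         if s1[i] == s2[j]: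
--             count += 1
--             i += 1
--             j += 1
--         elif s1[i] < s2[j]:
--             i += 1
--         else:
--             j += 1
--     same_position = sum(1 for i in range(4) if str1[i] == str2[i])
--     return count - same_position
-- ===== Notes on version B (the rewrite author's own statement) =====
-- stated objective: alternative
-- what changed: The frequency-dictionary pair and the min-of-counts key loop are replaced by sorting both digit strings and counting matches with a two-pointer merge; the same-position term is unchanged.
import Mathlib
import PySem

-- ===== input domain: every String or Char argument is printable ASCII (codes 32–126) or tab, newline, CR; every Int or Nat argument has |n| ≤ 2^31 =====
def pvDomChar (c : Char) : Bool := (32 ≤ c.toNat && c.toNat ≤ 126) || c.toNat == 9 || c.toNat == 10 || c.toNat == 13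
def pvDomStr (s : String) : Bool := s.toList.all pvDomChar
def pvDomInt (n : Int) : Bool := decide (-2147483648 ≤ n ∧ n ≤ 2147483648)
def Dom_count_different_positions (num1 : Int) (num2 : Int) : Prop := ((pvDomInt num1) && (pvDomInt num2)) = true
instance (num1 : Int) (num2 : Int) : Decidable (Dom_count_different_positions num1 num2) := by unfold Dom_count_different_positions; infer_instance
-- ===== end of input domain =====

-- B replaces A's two frequency dicts and min-of-counts key loop by a sorted two-pointer merge (alternative decomposition, same result).

-- ===== PORT A =====
-- same_position = sum(1 for i in range(4) if str1[i] == str2[i]); out-of-range indexing (Python IndexError) is excluded by Pre_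
def pvSamePosA (s1 s2 : List Char) : Int :=
  (PySem.List.pyRange 0 4 1).foldl (fun acc i =>
    match PySem.List.pyGet? s1 i, PySem.List.pyGet? s2 i with
    | some a, some b => if a = b then acc + 1 else acc
    | _, _ => acc) 0

def count_different_positions (num1 : Int) (num2 : Int) : Int :=
  let str1 := PySem.Int.toChars num1
  let str2 := PySem.Int.toChars num2
  let freq1 := str1.foldl (fun d x => if d.contains x then d.insert x (d.getD x 0 + 1) else d.insert x (1 : Int)) PySem.Dict.empty
  let freq2 := str2.foldl (fun d x => if d.contains x then d.insert x (d.getD x 0 + 1) else d.insert x (1 : Int)) PySem.Dict.empty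
  let count := freq1.keys.foldl (fun c digit => if freq2.contains digit then c + min (freq1.getD digit 0) (freq2.getD digit 0) else c) (0 : Int)
  count - pvSamePosA str1 str2

-- ===== PORT B =====
-- the while-loop over indices i, j into the two sorted lists, as recursion on the unread suffixes
def pvMergeCount : List Char → List Char → Int
  | [], _ => 0
  | _ :: _, [] => 0
  | a :: s, b :: t =>
    if a = b then pvMergeCount s t + 1
    else if a < b then pvMergeCount s (b :: t)
    else pvMergeCount (a :: s) t
termination_by s t => s.length + t.length
decreasing_by
  all_goals simp
  all_goals omega

def pvSamePosB (s1 s2 : List Char) : Int :=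
  (PySem.List.pyRange 0 4 1).foldl (fun acc i =>
    match PySem.List.pyGet? s1 i, PySem.List.pyGet? s2 i with
    | some a, some b => if a = b then acc + 1 else acc
    | _, _ => acc) 0

def count_different_positions_alt (num1 : Int) (num2 : Int) : Int :=
  let str1 := PySem.Int.toChars num1
  let str2 := PySem.Int.toChars num2
  let s1 := PySem.List.sorted str1 (fun c => c) false
  let s2 := PySem.List.sorted str2 (fun c => c) false
  pvMergeCount s1 s2 - pvSamePosB str1 str2

-- ===== PRECONDITION & SPEC =====
-- Pre_ excludes exactly the inputs where str(num) has fewer than 4 characters: there A's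
-- same-position comprehension raises IndexError (B's raises identically).
def Pre_count_different_positions (num1 : Int) (num2 : Int) : Prop :=
  (1000 ≤ num1 ∨ num1 ≤ -100) ∧ (1000 ≤ num2 ∨ num2 ≤ -100)
instance (num1 : Int) (num2 : Int) : Decidable (Pre_count_different_positions num1 num2) := by unfold Pre_count_different_positions; infer_instance
def pvWitness_count_different_positions : Int × Int := (1234, 4321)

def Spec_count_different_positions (num1 : Int) (num2 : Int) (out : Int) : Prop := out = count_different_positions_alt num1 num2
instance (num1 : Int) (num2 : Int) (out : Int) : Decidable (Spec_count_different_positions num1 num2 out) := by unfold Spec_count_different_positions; infer_instance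

-- ===== CLAIM (what is proved, stated in full; the proofs are below) =====
def Claim_equal_count_different_positions : Prop := ∀ (num1 : Int) (num2 : Int), Dom_count_different_positions num1 num2 → Pre_count_different_positions num1 num2 → Spec_count_different_positions num1 num2 (count_different_positions num1 num2)

-- ===== LEMMAS AND PROOFS =====

theorem pv_getD_of_not_contains (d : PySem.Dict Char Int) (x : Char) (h : d.contains x = false) :
    d.getD x 0 = 0 := by
  have h0 : d.get? x = none := (PySem.Dict.get?_eq_none_iff_contains d x).mpr h
  simp [PySem.Dict.getD, h0]

theorem pv_freq_eq_counter (l : List Char) :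
    l.foldl (fun d x => if d.contains x then d.insert x (d.getD x 0 + 1) else d.insert x (1 : Int)) PySem.Dict.empty
      = PySem.Dict.counter l := by
  have hf : (fun (d : PySem.Dict Char Int) x => if d.contains x then d.insert x (d.getD x 0 + 1) else d.insert x (1 : Int))
      = fun d x => d.insert x (d.getD x 0 + 1) := by
    funext d x
    by_cases h : d.contains x
    · simp [h]
    · simp only [Bool.not_eq_true] at h
      simp [h, pv_getD_of_not_contains d x h]
  rw [hf, PySem.Dict.foldl_insert_getD_add_one_eq_counter]

theorem pv_merge_eq_card_inter (s t : List Char) :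
    s.Pairwise (· ≤ ·) → t.Pairwise (· ≤ ·) →
    pvMergeCount s t = (((s : Multiset Char)) ∩ (t : Multiset Char)).card := by
  induction s, t using pvMergeCount.induct with
  | case1 t => intro _ _; simp [pvMergeCount]
  | case2 a s => intro _ _; simp [pvMergeCount]
  | case3 s b t ih =>
    intro hs ht
    rw [List.pairwise_cons] at hs ht
    have ihv := ih hs.2 ht.2
    have hco : ((b :: s : List Char) : Multiset Char) ∩ ((b :: t : List Char) : Multiset Char)
        = b ::ₘ (((s : Multiset Char)) ∩ (t : Multiset Char)) := by
      rw [← Multiset.cons_coe, ← Multiset.cons_coe,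
        Multiset.cons_inter_of_pos _ (Multiset.mem_cons_self b _), Multiset.erase_cons_head]
    rw [hco]
    simp [pvMergeCount, ihv]
  | case4 a s b t hab hlt ih =>
    intro hs ht
    rw [List.pairwise_cons] at hs
    have ihv := ih hs.2 ht
    have hnot : a ∉ ((b :: t : List Char) : Multiset Char) := by
      rw [List.pairwise_cons] at ht
      rw [Multiset.mem_coe]
      intro hmem
      rcases List.mem_cons.mp hmem with h | h
      · exact absurd h (ne_of_lt hlt)
      · exact absurd rfl (ne_of_lt (lt_of_lt_of_le hlt (ht.1 a h)))
    rw [show ((a :: s : List Char) : Multiset Char) = a ::ₘ (s : Multiset Char) from (Multiset.cons_coe a s).symm,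
      Multiset.cons_inter_of_neg _ hnot]
    simpa [pvMergeCount, hab, hlt] using ihv
  | case5 a s b t hab hlt ih =>
    intro hs ht
    rw [List.pairwise_cons] at ht
    have ihv := ih hs ht.2
    have hb : b < a := lt_of_le_of_ne (le_of_not_gt hlt) (fun he => hab he.symm)
    have hnot : b ∉ ((a :: s : List Char) : Multiset Char) := by
      rw [List.pairwise_cons] at hs
      rw [Multiset.mem_coe]
      intro hmem
      rcases List.mem_cons.mp hmem with h | h
      · exact absurd h (ne_of_lt hb)
      · exact absurd rfl (ne_of_lt (lt_of_lt_of_le hb (hs.1 b h)))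
    rw [Multiset.inter_comm,
      show ((b :: t : List Char) : Multiset Char) = b ::ₘ (t : Multiset Char) from (Multiset.cons_coe b t).symm,
      Multiset.cons_inter_of_neg _ hnot, Multiset.inter_comm]
    simpa [pvMergeCount, hab, hlt] using ihv

theorem pv_sum_min_eq_card_inter (l1 l2 : List Char) :
    ∑ a ∈ l1.toFinset, min (l1.count a) (l2.count a)
      = (((l1 : Multiset Char)) ∩ (l2 : Multiset Char)).card := by
  rw [← Multiset.toFinset_sum_count_eq]
  have hsub : ((((l1 : Multiset Char)) ∩ (l2 : Multiset Char))).toFinset ⊆ l1.toFinset := by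
    intro a ha
    rw [Multiset.mem_toFinset] at ha
    rw [List.mem_toFinset]
    simpa using (Multiset.mem_of_le Multiset.inter_le_left ha)
  rw [← Finset.sum_subset hsub]
  · apply Finset.sum_congr rfl
    intro a _
    rw [Multiset.count_inter]
    simp
  · intro a _ ha
    rw [Multiset.mem_toFinset, ← Multiset.count_pos, Nat.pos_iff_ne_zero, not_not,
      Multiset.count_inter] at ha
    simpa using ha

theorem pv_count_eq_card_inter (l1 l2 : List Char) :
    (PySem.Set.ofList l1).foldl (fun c d => if (PySem.Dict.counter l2).contains d then c + min ((PySem.Dict.counter l1).getD d 0) ((PySem.Dict.counter l2).getD d 0) else c) (0 : Int)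
      = (((l1 : Multiset Char)) ∩ (l2 : Multiset Char)).card := by
  have hf : (fun (c : Int) d => if (PySem.Dict.counter l2).contains d then c + min ((PySem.Dict.counter l1).getD d 0) ((PySem.Dict.counter l2).getD d 0) else c)
      = fun c d => c + min ((l1.count d : Int)) ((l2.count d : Int)) := by
    funext c d
    rw [PySem.Dict.getD_counter, PySem.Dict.getD_counter, PySem.Dict.contains_counter]
    by_cases h : d ∈ l2
    · simp [h]
    · have h2 : l2.count d = 0 := List.count_eq_zero.mpr h
      simp [h, h2]
  rw [hf, PySem.List.foldl_add]
  have hfin : (PySem.Set.ofList l1).toFinset = l1.toFinset := by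
    apply Finset.ext
    intro a
    simp [PySem.Set.mem_ofList]
  have := List.sum_toFinset (l := PySem.Set.ofList l1)
      (fun d => min ((l1.count d : Int)) ((l2.count d : Int))) (PySem.Set.nodup_ofList l1)
  rw [hfin] at this
  rw [zero_add, ← this, ← pv_sum_min_eq_card_inter l1 l2]
  push_cast
  rfl

-- ===== VERDICT (by name: the statement is the Claim_ definition above) =====
theorem count_different_positions_spec : Claim_equal_count_different_positions := by
  intro num1 num2 _ _
  unfold Spec_count_different_positions count_different_positions count_different_positions_alt
  simp only [pv_freq_eq_counter, PySem.Dict.keys_counter]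
  rw [pv_count_eq_card_inter]
  rw [pv_merge_eq_card_inter _ _
    (PySem.List.sorted_pairwise _ _) (PySem.List.sorted_pairwise _ _)]
  have h1 : ((PySem.List.sorted (PySem.Int.toChars num1) (fun c => c) false : List Char) : Multiset Char)
      = ((PySem.Int.toChars num1 : List Char) : Multiset Char) :=
    Multiset.coe_eq_coe.mpr (PySem.List.sorted_perm _ _ _)
  have h2 : ((PySem.List.sorted (PySem.Int.toChars num2) (fun c => c) false : List Char) : Multiset Char)
      = ((PySem.Int.toChars num2 : List Char) : Multiset Char) :=
    Multiset.coe_eq_coe.mpr (PySem.List.sorted_perm _ _ _)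
  rw [h1, h2]
  rfl
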